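-- pv_equiv track=rewrite | github.com/ericchen321/ros_x_habitat | src/scripts/compare_metrics.py | get_metric_names_1_and_2
-- ===== SOURCE A (Python) =====
-- from typing import Tuple, List, Dict
--
-- def get_metric_name_appended_by_suffix(
--     metric_name: str,
--     suffix: str
-- ) -> str:
--     r"""
--     Return String <metric_name><suffix>.
--     :param metric_name: name of a metric
--     :param suffix: suffix to append
--     :return: the metric name appended by the suffix
--     """
--     return f"{metric_name}{suffix}"
--
-- def get_metric_names_1_and_2(
--     metric_names: str
-- ) -> Tuple[List[str], List[str]]:
--     r"""
--     Return two list of metric names. Each metric in the list has its name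
--     appended by "_1" or "_2".
--     :param metric_names: names of (original) metrics
--     :return: two list of metric names
--     """
--     metric_names_1 = []
--     metric_names_2 = []
--     for suffix in ["_1", "_2"]:
--         for metric_name in metric_names:
--             if suffix == "_1":
--                 metric_names_1.append(get_metric_name_appended_by_suffix(metric_name, suffix))
--             else:
--                 metric_names_2.append(get_metric_name_appended_by_suffix(metric_name, suffix))
--     return metric_names_1, metric_names_2
-- ===== SOURCE B (Python) =====
-- def get_metric_names_1_and_2(metric_names):
--     metric_names_1 = []
--     metric_names_2 = []
--     for name in metric_names:
--         metric_names_1.append(f"{name}_1")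
--         metric_names_2.append(f"{name}_2")
--     return metric_names_1, metric_names_2
-- ===== Notes on version B (the rewrite author's own statement) =====
-- stated objective: simpler
-- what changed: Replaced A's two passes (an outer loop over the suffix list with a branch inside) by a single pass over metric_names that builds both suffixed lists at once, dropping the helper.
import Mathlib
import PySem

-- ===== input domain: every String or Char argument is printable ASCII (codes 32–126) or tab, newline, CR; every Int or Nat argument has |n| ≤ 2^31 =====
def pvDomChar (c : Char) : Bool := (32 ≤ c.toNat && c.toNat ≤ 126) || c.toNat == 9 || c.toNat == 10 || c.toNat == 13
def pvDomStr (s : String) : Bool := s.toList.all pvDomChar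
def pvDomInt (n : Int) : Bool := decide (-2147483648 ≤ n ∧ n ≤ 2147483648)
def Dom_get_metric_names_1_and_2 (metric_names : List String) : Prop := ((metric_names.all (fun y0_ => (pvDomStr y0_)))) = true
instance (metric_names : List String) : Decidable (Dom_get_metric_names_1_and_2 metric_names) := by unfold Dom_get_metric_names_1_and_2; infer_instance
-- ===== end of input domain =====

-- B builds both suffixed lists in a single pass over metric_names instead of A's two passes over a suffix list with a branch (objective: simpler).

-- ===== PORT A =====
-- helper of A
def get_metric_name_appended_by_suffix (metric_name : String) (suffix : String) : String :=
  metric_name ++ suffix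

-- Port of A: outer loop over the suffix list, inner loop over metric_names with a branch
def get_metric_names_1_and_2 (metric_names : List String) : List String × List String :=
  (["_1", "_2"].foldl (fun (st : List String × List String) suffix =>
    metric_names.foldl (fun (st : List String × List String) metric_name =>
      if suffix == "_1" then
        (st.1 ++ [get_metric_name_appended_by_suffix metric_name suffix], st.2)
      else
        (st.1, st.2 ++ [get_metric_name_appended_by_suffix metric_name suffix])) st)
    ([], []))

-- ===== PORT B =====
-- Port of B: one pass building both lists
def get_metric_names_1_and_2_alt (metric_names : List String) : List String × List String :=
  metric_names.foldl (fun (st : List String × List String) name =>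
    (st.1 ++ [name ++ "_1"], st.2 ++ [name ++ "_2"])) ([], [])

-- ===== PRECONDITION & SPEC =====
def Spec_get_metric_names_1_and_2 (metric_names : List String) (out : List String × List String) : Prop := out = get_metric_names_1_and_2_alt metric_names
instance (metric_names : List String) (out : List String × List String) : Decidable (Spec_get_metric_names_1_and_2 metric_names out) := by unfold Spec_get_metric_names_1_and_2; infer_instance

-- ===== CLAIM (what is proved, stated in full; the proofs are below) =====
def Claim_equal_get_metric_names_1_and_2 : Prop := ∀ (metric_names : List String), Dom_get_metric_names_1_and_2 metric_names → Spec_get_metric_names_1_and_2 metric_names (get_metric_names_1_and_2 metric_names)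

-- ===== LEMMAS AND PROOFS =====

-- ===== VERDICT (by name: the statement is the Claim_ definition above) =====
lemma foldA1 (xs : List String) (acc : List String × List String) :
    xs.foldl (fun (st : List String × List String) n => (st.1 ++ [n ++ "_1"], st.2)) acc
    = (acc.1 ++ xs.map (fun n => n ++ "_1"), acc.2) := by
  induction xs generalizing acc with
  | nil => simp
  | cons x xs ih => simp [List.foldl, ih]

lemma foldA2 (xs : List String) (acc : List String × List String) :
    xs.foldl (fun (st : List String × List String) n => (st.1, st.2 ++ [n ++ "_2"])) acc
    = (acc.1, acc.2 ++ xs.map (fun n => n ++ "_2")) := by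
  induction xs generalizing acc with
  | nil => simp
  | cons x xs ih => simp [List.foldl, ih]

lemma foldB (xs : List String) (acc : List String × List String) :
    xs.foldl (fun (st : List String × List String) n =>
      (st.1 ++ [n ++ "_1"], st.2 ++ [n ++ "_2"])) acc
    = (acc.1 ++ xs.map (fun n => n ++ "_1"), acc.2 ++ xs.map (fun n => n ++ "_2")) := by
  induction xs generalizing acc with
  | nil => simp
  | cons x xs ih => simp [List.foldl, ih]

theorem get_metric_names_1_and_2_spec : Claim_equal_get_metric_names_1_and_2 := by
  intro metric_names _
  show get_metric_names_1_and_2 metric_names = get_metric_names_1_and_2_alt metric_names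
  simp [get_metric_names_1_and_2, get_metric_names_1_and_2_alt, List.foldl,
    get_metric_name_appended_by_suffix, foldA1, foldA2, foldB]
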